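-- pv_equiv track=rewrite | github.com/rakesh-050791/DS-Algo | Intermediate/August-2022/08-Aug-2022.py | solve
-- ===== SOURCE A (Python) =====
-- def solve(A):
--
--     n = len(A)
--     alreadyPresent = set()
--     minDiff = 10**5
--
--     for i in range(n):
--         if A[i] in alreadyPresent:
--             if i - A.index(A[i]) < minDiff:
--                 minDiff = i - A.index(A[i])
--         alreadyPresent.add(A[i])
--
--     if  minDiff == 10**5:
--         return -1
--     else:
--         return minDiff
-- ===== SOURCE B (Python) =====
-- def solve(A):
--     groups = {}
--     for i, x in enumerate(A):
--         groups.setdefault(x, []).append(i)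
--     minDiff = 10**5
--     for idxs in groups.values():
--         if len(idxs) >= 2:
--             d = idxs[1] - idxs[0]
--             if d < minDiff:
--                 minDiff = d
--     return -1 if minDiff == 10**5 else minDiff
-- ===== Notes on version B (the rewrite author's own statement) =====
-- stated objective: faster
-- what changed: A's single stateful scan with a seen-set and a repeated linear A.index call per duplicate is replaced by building a value-to-index-list grouping dict in one pass and then minimising the difference between each value's second and first occurrence index over the groups.
import Mathlib
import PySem

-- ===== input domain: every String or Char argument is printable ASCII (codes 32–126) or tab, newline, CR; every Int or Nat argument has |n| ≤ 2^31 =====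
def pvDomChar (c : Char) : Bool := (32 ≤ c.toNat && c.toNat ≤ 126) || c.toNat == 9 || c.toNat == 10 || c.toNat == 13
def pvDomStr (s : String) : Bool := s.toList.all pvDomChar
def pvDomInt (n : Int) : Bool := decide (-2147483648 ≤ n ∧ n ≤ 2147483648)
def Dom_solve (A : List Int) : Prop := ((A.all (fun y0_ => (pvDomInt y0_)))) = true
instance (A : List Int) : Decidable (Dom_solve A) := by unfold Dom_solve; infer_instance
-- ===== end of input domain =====

-- B replaces A's seen-set scan with its per-duplicate linear A.index call by a one-pass
-- value→index-list grouping dict followed by a pass over the groups (objective: faster,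
-- measured; A rescans the list inside the loop, B does not).

-- ===== PORT A =====
def solve (A : List Int) : Int :=
  let n : Int := A.length
  let st := (PySem.List.pyRange 0 n 1).foldl
    (fun (st : PySem.Set Int × Int) i =>
      let x := PySem.List.pyGetD A i 0
      let st' :=
        if PySem.Set.contains st.1 x then
          if i - (((PySem.List.index? A x).getD 0 : Nat) : Int) < st.2 then
            (st.1, i - (((PySem.List.index? A x).getD 0 : Nat) : Int))
          else st
        else st
      (PySem.Set.add st'.1 x, st'.2))
    (PySem.Set.empty, 100000)
  if st.2 = 100000 then (-1) else st.2

-- ===== PORT B =====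
def solve_alt (A : List Int) : Int :=
  let groups := (PySem.List.enumerate A).foldl
    (fun (d : PySem.Dict Int (List Int)) p => d.modify p.2 [] (fun l => l ++ [p.1]))
    PySem.Dict.empty
  let m := (PySem.Dict.values groups).foldl
    (fun m idxs =>
      if 2 ≤ idxs.length then
        let dd := PySem.List.pyGetD idxs 1 0 - PySem.List.pyGetD idxs 0 0
        if dd < m then dd else m
      else m) 100000
  if m = 100000 then (-1) else m

-- ===== PRECONDITION & SPEC =====
def Spec_solve (A : List Int) (out : Int) : Prop := out = solve_alt A
instance (A : List Int) (out : Int) : Decidable (Spec_solve A out) := by unfold Spec_solve; infer_instance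

-- ===== CLAIM (what is proved, stated in full; the proofs are below) =====
def Claim_equal_solve : Prop := ∀ (A : List Int), Dom_solve A → Spec_solve A (solve A)

-- ===== LEMMAS AND PROOFS =====

-- helper definitions used only by the proofs
def pvFirst (A : List Int) (v : Int) : Int := (((PySem.List.index? A v).getD 0 : Nat) : Int)

def pvGombo (A : List Int) : List (Int × Int) → PySem.Set Int → List Int
  | [], _ => []
  | p :: ps, s =>
    (if PySem.Set.contains s p.2 then [p.1 - pvFirst A p.2] else []) ++
      pvGombo A ps (PySem.Set.add s p.2)

def pvOcc (A : List Int) (v : Int) : List Int :=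
  ((PySem.List.enumerate A).filter (fun p => p.2 == v)).map (fun p => p.1)

def pvLB (A : List Int) : List Int :=
  ((PySem.List.dedup A).filter (fun v => 2 ≤ (pvOcc A v).length)).map
    (fun v => PySem.List.pyGetD (pvOcc A v) 1 0 - PySem.List.pyGetD (pvOcc A v) 0 0)

-- the strict-less running update is foldl min
lemma pv_strict_eq_min (L : List Int) (c : Int) :
    L.foldl (fun m x => if x < m then x else m) c = L.foldl min c := by
  induction L generalizing c with
  | nil => rfl
  | cons a t ih =>
      simp only [List.foldl_cons, ih]
      congr 1
      simp only [min_def]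
      split_ifs <;> omega

lemma pv_fold_min_le_init (L : List Int) (c : Int) : L.foldl min c ≤ c := by
  induction L generalizing c with
  | nil => simp
  | cons a t ih => exact le_trans (ih (min c a)) (min_le_left _ _)

lemma pv_fold_min_le_mem (L : List Int) (c x : Int) (hx : x ∈ L) : L.foldl min c ≤ x := by
  induction L generalizing c with
  | nil => cases hx
  | cons a t ih =>
      rcases List.mem_cons.mp hx with rfl | h
      · exact le_trans (pv_fold_min_le_init t (min c x)) (min_le_right _ _)
      · exact ih (min c a) h

lemma pv_fold_min_cases (L : List Int) (c : Int) :
    L.foldl min c = c ∨ L.foldl min c ∈ L := by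
  induction L generalizing c with
  | nil => left; rfl
  | cons a t ih =>
      rcases ih (min c a) with h | h
      · rcases le_total c a with hca | hca
        · left; simpa [min_eq_left hca] using h
        · right
          rw [min_eq_right hca] at h
          simp only [List.foldl_cons, min_eq_right hca, h]
          exact List.mem_cons_self
      · right; exact List.mem_cons_of_mem _ h

lemma pv_fold_min_eq_of_dom (c : Int) (LA LB : List Int)
    (h1 : ∀ x ∈ LA, ∃ y ∈ LB, y ≤ x) (h2 : ∀ y ∈ LB, y ∈ LA) :
    LA.foldl min c = LB.foldl min c := by
  apply le_antisymm
  · rcases pv_fold_min_cases LB c with h | h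
    · rw [h]; exact pv_fold_min_le_init LA c
    · exact pv_fold_min_le_mem LA c _ (h2 _ h)
  · rcases pv_fold_min_cases LA c with h | h
    · rw [h]; exact pv_fold_min_le_init LB c
    · rcases h1 _ h with ⟨y, hy, hyx⟩
      exact le_trans (pv_fold_min_le_mem LB c y hy) hyx

-- A's fold step, named, and its characterisation through pvGombo
def pvStepA (A : List Int) (st : PySem.Set Int × Int) (p : Int × Int) : PySem.Set Int × Int :=
  let x := p.2
  let st' :=
    if PySem.Set.contains st.1 x then
      if p.1 - pvFirst A x < st.2 then (st.1, p.1 - pvFirst A x) else st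
    else st
  (PySem.Set.add st'.1 x, st'.2)

lemma pv_foldA_char (A : List Int) (ps : List (Int × Int)) (s : PySem.Set Int) (m : Int) :
    (ps.foldl (pvStepA A) (s, m)).2
    = (pvGombo A ps s).foldl (fun m x => if x < m then x else m) m := by
  induction ps generalizing s m with
  | nil => rfl
  | cons p ps ih =>
      simp only [List.foldl_cons]
      by_cases hc : PySem.Set.contains s p.2
      · have hmem : p.2 ∈ s := (PySem.Set.contains_iff s p.2).mp hc
        have hstep : pvStepA A (s, m) p =
            (PySem.Set.add s p.2, if p.1 - pvFirst A p.2 < m then p.1 - pvFirst A p.2 else m) := by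
          by_cases hlt : p.1 - pvFirst A p.2 < m <;> simp [pvStepA, hmem, hlt]
        rw [hstep, ih]
        simp [pvGombo, hmem]
      · have hmem : p.2 ∉ s := fun h => hc ((PySem.Set.contains_iff s p.2).mpr h)
        have hstep : pvStepA A (s, m) p = (PySem.Set.add s p.2, m) := by
          simp [pvStepA, hmem]
        rw [hstep, ih]
        simp [pvGombo, hmem]

lemma pv_gombo_elim (A : List Int) (ps : List (Int × Int)) (s : PySem.Set Int) (x : Int)
    (hx : x ∈ pvGombo A ps s) :
    ∃ (k : Nat) (hk : k < ps.length),
      (((ps[k]'hk).2 ∈ s ∨ ∃ j, ∃ (hj : j < ps.length), j < k ∧ (ps[j]'hj).2 = (ps[k]'hk).2)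
        ∧ x = (ps[k]'hk).1 - pvFirst A (ps[k]'hk).2) := by
  induction ps generalizing s with
  | nil => cases hx
  | cons p ps ih =>
      rcases List.mem_append.mp hx with h | h
      · have h' : p.2 ∈ s ∧ x = p.1 - pvFirst A p.2 := by
          by_cases hc : p.2 ∈ s
          · simp [hc] at h; exact ⟨hc, h⟩
          · simp [hc] at h
        exact ⟨0, by simp, Or.inl (by simpa using h'.1), by simpa using h'.2⟩
      · rcases ih (PySem.Set.add s p.2) h with ⟨k, hk, hcond, hval⟩
        refine ⟨k + 1, by simpa using Nat.succ_lt_succ hk, ?_, by simpa using hval⟩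
        rcases hcond with hmem | ⟨j, hj, hjk, hje⟩
        · rcases (PySem.Set.mem_add s p.2 _).mp hmem with hmem' | heq
          · left; simpa using hmem'
          · right
            exact ⟨0, by simp, Nat.succ_pos _, by simpa using heq.symm⟩
        · right
          exact ⟨j + 1, by simpa using Nat.succ_lt_succ hj, Nat.succ_lt_succ hjk, by simpa using hje⟩

lemma pv_gombo_intro (A : List Int) (ps : List (Int × Int)) (s : PySem.Set Int)
    (k : Nat) (hk : k < ps.length)
    (hcond : (ps[k]'hk).2 ∈ s ∨ ∃ j, ∃ (hj : j < ps.length), j < k ∧ (ps[j]'hj).2 = (ps[k]'hk).2) :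
    (ps[k]'hk).1 - pvFirst A (ps[k]'hk).2 ∈ pvGombo A ps s := by
  induction ps generalizing s k with
  | nil => cases hk
  | cons p ps ih =>
      cases k with
      | zero =>
          rcases hcond with hmem | ⟨j, hj, hjk, _⟩
          · have hmem' : p.2 ∈ s := by simpa using hmem
            simp only [pvGombo]
            simp [hmem']
          · omega
      | succ k =>
          have hk' : k < ps.length := by simpa using Nat.lt_of_succ_lt_succ hk
          apply List.mem_append_right
          have : (ps[k]'hk').2 ∈ PySem.Set.add s p.2 ∨
              ∃ j, ∃ (hj : j < ps.length), j < k ∧ (ps[j]'hj).2 = (ps[k]'hk').2 := by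
            rcases hcond with hmem | ⟨j, hj, hjk, hje⟩
            · left; exact (PySem.Set.mem_add s p.2 _).mpr (Or.inl (by simpa using hmem))
            · cases j with
              | zero =>
                  left
                  exact (PySem.Set.mem_add s p.2 _).mpr (Or.inr (by simpa using hje.symm))
              | succ j =>
                  right
                  exact ⟨j, by simpa using Nat.lt_of_succ_lt_succ hj, Nat.lt_of_succ_lt_succ hjk,
                    by simpa using hje⟩
          simpa using ih (PySem.Set.add s p.2) k hk' this

-- pvOcc facts
lemma pv_mem_occ (A : List Int) (v x : Int) :
    x ∈ pvOcc A v ↔ ∃ (k : Nat) (hk : k < A.length), x = (k : Int) ∧ A[k] = v := by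
  unfold pvOcc
  simp only [List.mem_map, List.mem_filter]
  constructor
  · rintro ⟨p, ⟨hp, hpv⟩, rfl⟩
    rcases (PySem.List.mem_enumerate_iff A 0 p).mp hp with ⟨k, hk, rfl⟩
    exact ⟨k, hk, by simp, by simpa using hpv⟩
  · rintro ⟨k, hk, rfl, hv⟩
    refine ⟨((k : Int), A[k]), ⟨?_, by simpa using hv⟩, rfl⟩
    exact (PySem.List.mem_enumerate_iff A 0 _).mpr ⟨k, hk, by simp⟩

lemma pv_occ_pairwise (A : List Int) (v : Int) : (pvOcc A v).Pairwise (· < ·) := by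
  unfold pvOcc
  rw [List.pairwise_map]
  exact List.Pairwise.filter _ (PySem.List.pairwise_lt_enumerate A 0)

lemma pv_occ_head (A : List Int) (v : Int) (hv : v ∈ A) :
    PySem.List.pyGetD (pvOcc A v) 0 0 = pvFirst A v ∧ pvFirst A v ∈ pvOcc A v ∧
      ∀ x ∈ pvOcc A v, pvFirst A v ≤ x := by
  obtain ⟨f, hf⟩ := Option.isSome_iff_exists.mp ((PySem.List.index?_isSome_iff A v).mpr hv)
  obtain ⟨hflt, hfv, hfmin⟩ := PySem.List.getElem_of_index?_eq_some hf
  have hf' : List.idxOf? v A = some f := by simpa using hf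
  have hfirst : pvFirst A v = (f : Int) := by
    simp [pvFirst, PySem.List.index?_eq_idxOf?, hf']
  have hmemf : pvFirst A v ∈ pvOcc A v := by
    rw [hfirst, pv_mem_occ]; exact ⟨f, hflt, rfl, hfv⟩
  have hlb : ∀ x ∈ pvOcc A v, pvFirst A v ≤ x := by
    intro x hx
    rcases (pv_mem_occ A v x).mp hx with ⟨k, hk, rfl, hkv⟩
    have : f ≤ k := by
      by_contra hlt
      exact hfmin k (by omega) hkv
    rw [hfirst]; exact_mod_cast this
  refine ⟨?_, hmemf, hlb⟩
  rcases hL : pvOcc A v with _ | ⟨a, t⟩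
  · rw [hL] at hmemf; cases hmemf
  · have hpw := pv_occ_pairwise A v
    rw [hL] at hpw hmemf hlb
    have ha : pvFirst A v ≤ a := hlb a List.mem_cons_self
    have : a ≤ pvFirst A v := by
      rcases List.mem_cons.mp hmemf with h | h
      · omega
      · exact le_of_lt ((List.pairwise_cons.mp hpw).1 _ h)
    have haf : a = pvFirst A v := le_antisymm this ha
    simp [PySem.List.pyGetD_ofNat', haf]

lemma pv_occ_two (A : List Int) (v : Int) (h2 : 2 ≤ (pvOcc A v).length) :
    PySem.List.pyGetD (pvOcc A v) 1 0 ∈ pvOcc A v ∧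
      PySem.List.pyGetD (pvOcc A v) 0 0 < PySem.List.pyGetD (pvOcc A v) 1 0 ∧
      ∀ x ∈ pvOcc A v, PySem.List.pyGetD (pvOcc A v) 0 0 < x →
        PySem.List.pyGetD (pvOcc A v) 1 0 ≤ x := by
  rcases hL : pvOcc A v with _ | ⟨a, t⟩
  · rw [hL] at h2; simp at h2
  rcases t with _ | ⟨b, t⟩
  · rw [hL] at h2; simp at h2
  have hpw := pv_occ_pairwise A v
  rw [hL] at hpw
  have hab : a < b := (List.pairwise_cons.mp hpw).1 b List.mem_cons_self
  have hbt : ∀ y ∈ t, b < y := (List.pairwise_cons.mp (List.pairwise_cons.mp hpw).2).1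
  have h0 : PySem.List.pyGetD (a :: b :: t) 0 0 = a := by
    simp [PySem.List.pyGetD_ofNat']
  have h1 : PySem.List.pyGetD (a :: b :: t) 1 0 = b := by
    simp [PySem.List.pyGetD_ofNat']
  rw [h0, h1]
  refine ⟨List.mem_cons_of_mem _ List.mem_cons_self, hab, ?_⟩
  intro x hx hax
  rcases List.mem_cons.mp hx with rfl | hx'
  · omega
  rcases List.mem_cons.mp hx' with rfl | hx''
  · omega
  · exact le_of_lt (hbt x hx'')

-- B's groups-and-values pass produces the pvLB fold
lemma pv_guard_fold (L : List Int) (c : Int)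
    (cond : Int → Prop) [DecidablePred cond] (val : Int → Int) :
    L.foldl (fun m v => if cond v then (if val v < m then val v else m) else m) c
    = ((L.filter (fun v => decide (cond v))).map val).foldl (fun m x => if x < m then x else m) c := by
  induction L generalizing c with
  | nil => rfl
  | cons a t ih =>
      by_cases h : cond a <;> simp [h, ih, List.foldl_cons]

lemma pv_solve_alt_eq (A : List Int) :
    solve_alt A = (if (pvLB A).foldl min 100000 = 100000 then -1
                   else (pvLB A).foldl min 100000) := by
  have hkeys : ((PySem.List.enumerate A).foldl
      (fun (d : PySem.Dict Int (List Int)) p => d.modify p.2 [] (fun l => l ++ [p.1]))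
      PySem.Dict.empty).keys = PySem.Set.ofList A := by
    have h := PySem.Dict.keys_foldl_modify_key (PySem.List.enumerate A)
      (fun p => p.2) ([] : List Int) (fun _ p l => l ++ [p.1]) PySem.Dict.empty
    rw [h, PySem.Dict.keys_empty, PySem.List.map_snd_enumerate, PySem.Set.ofList_eq_foldl]
    rfl
  have hnodup : ((PySem.List.enumerate A).foldl
      (fun (d : PySem.Dict Int (List Int)) p => d.modify p.2 [] (fun l => l ++ [p.1]))
      PySem.Dict.empty).keys.Nodup :=
    PySem.Dict.nodup_keys_foldl_modify_key (PySem.List.enumerate A)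
      (fun p => p.2) ([] : List Int) (fun _ p l => l ++ [p.1]) PySem.Dict.empty
      (by simp [PySem.Dict.keys_empty])
  have hgetD : ∀ v : Int, ((PySem.List.enumerate A).foldl
      (fun (d : PySem.Dict Int (List Int)) p => d.modify p.2 [] (fun l => l ++ [p.1]))
      PySem.Dict.empty).getD v [] = pvOcc A v := by
    intro v
    have hsw : (PySem.List.enumerate A).foldl
        (fun (d : PySem.Dict Int (List Int)) p => d.modify p.2 [] (fun l => l ++ [p.1]))
        PySem.Dict.empty
        = ((PySem.List.enumerate A).map Prod.swap).foldl
          (fun (d : PySem.Dict Int (List Int)) q => d.modify q.1 [] (fun l => l ++ [q.2]))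
          PySem.Dict.empty := by
      rw [List.foldl_map]
      rfl
    rw [hsw, PySem.Dict.getD_foldl_modify_append]
    rw [PySem.Dict.getD_empty, List.filter_map]
    unfold pvOcc
    simp [Function.comp_def, Prod.swap]
  have hvalues : ((PySem.List.enumerate A).foldl
      (fun (d : PySem.Dict Int (List Int)) p => d.modify p.2 [] (fun l => l ++ [p.1]))
      PySem.Dict.empty).values = (PySem.List.dedup A).map (fun v => pvOcc A v) := by
    rw [PySem.Dict.values_eq_map_keys _ hnodup ([] : List Int), hkeys,
      PySem.List.dedup_eq_ofList]
    exact List.map_congr_left (fun v _ => hgetD v)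
  show (if _ = 100000 then -1 else _) = _
  rw [hvalues, List.foldl_map]
  have := pv_guard_fold (PySem.List.dedup A) 100000
      (fun v => 2 ≤ (pvOcc A v).length)
      (fun v => PySem.List.pyGetD (pvOcc A v) 1 0 - PySem.List.pyGetD (pvOcc A v) 0 0)
  simp only [this, pv_strict_eq_min]
  rfl

lemma pv_solve_eq (A : List Int) :
    solve A = (if (pvGombo A (PySem.List.enumerate A) PySem.Set.empty).foldl min 100000 = 100000
               then -1
               else (pvGombo A (PySem.List.enumerate A) PySem.Set.empty).foldl min 100000) := by
  have h : (PySem.List.pyRange 0 (A.length : Int) 1).foldl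
      (fun st i => pvStepA A st (i, PySem.List.pyGetD A i 0)) (PySem.Set.empty, 100000)
      = (PySem.List.enumerate A).foldl (pvStepA A) (PySem.Set.empty, 100000) := by
    rw [PySem.List.enumerate_eq_map_pyRange A 0, List.foldl_map]
    rfl
  show (if _ = 100000 then -1 else _) = _
  rw [show ((PySem.List.pyRange 0 (A.length : Int) 1).foldl
      (fun (st : PySem.Set Int × Int) i =>
        let x := PySem.List.pyGetD A i 0
        let st' :=
          if PySem.Set.contains st.1 x then
            if i - (((PySem.List.index? A x).getD 0 : Nat) : Int) < st.2 then
              (st.1, i - (((PySem.List.index? A x).getD 0 : Nat) : Int))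
            else st
          else st
        (PySem.Set.add st'.1 x, st'.2)) (PySem.Set.empty, 100000))
      = (PySem.List.pyRange 0 (A.length : Int) 1).foldl
        (fun st i => pvStepA A st (i, PySem.List.pyGetD A i 0)) (PySem.Set.empty, 100000) from rfl,
    h, pv_foldA_char, pv_strict_eq_min]

lemma pv_dom1 (A : List Int) :
    ∀ x ∈ pvGombo A (PySem.List.enumerate A) PySem.Set.empty, ∃ y ∈ pvLB A, y ≤ x := by
  intro x hx
  rcases pv_gombo_elim A _ _ x hx with ⟨k, hk, hcond, hval⟩
  rcases hcond with hmem | ⟨j, hj, hjk, hje⟩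
  · exact absurd hmem (by simp [PySem.Set.empty])
  have hkA : k < A.length := by simpa using hk
  have hjA : j < A.length := by simpa using hj
  rw [PySem.List.getElem_enumerate A 0 k hk] at hval
  rw [PySem.List.getElem_enumerate A 0 j hj, PySem.List.getElem_enumerate A 0 k hk] at hje
  simp only [zero_add] at hval hje
  set v := A[k] with hvdef
  have hvA : v ∈ A := List.getElem_mem hkA
  have hjocc : (j : Int) ∈ pvOcc A v := (pv_mem_occ A v _).mpr ⟨j, hjA, rfl, hje⟩
  have hkocc : (k : Int) ∈ pvOcc A v := (pv_mem_occ A v _).mpr ⟨k, hkA, rfl, rfl⟩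
  have h2 : 2 ≤ (pvOcc A v).length := by
    rcases hO : pvOcc A v with _ | ⟨a, t⟩
    · rw [hO] at hjocc; cases hjocc
    rcases t with _ | ⟨b, t⟩
    · rw [hO] at hjocc hkocc
      have h1 : (j : Int) = a := by simpa using hjocc
      have h2' : (k : Int) = a := by simpa using hkocc
      omega
    · simp
  obtain ⟨hhead, hmemf, hlb⟩ := pv_occ_head A v hvA
  obtain ⟨hmem1, hlt01, hsec⟩ := pv_occ_two A v h2
  refine ⟨PySem.List.pyGetD (pvOcc A v) 1 0 - PySem.List.pyGetD (pvOcc A v) 0 0, ?_, ?_⟩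
  · unfold pvLB
    refine List.mem_map.mpr ⟨v, List.mem_filter.mpr ⟨(PySem.List.mem_dedup A v).mpr hvA, by
      simpa using h2⟩, rfl⟩
  · have hfk : pvFirst A v ≤ (j : Int) := hlb _ hjocc
    have hjk' : (j : Int) < (k : Int) := by exact_mod_cast hjk
    have hsk : PySem.List.pyGetD (pvOcc A v) 1 0 ≤ (k : Int) := by
      apply hsec _ hkocc
      rw [hhead]; omega
    rw [hval, hhead]
    omega

lemma pv_dom2 (A : List Int) :
    ∀ y ∈ pvLB A, y ∈ pvGombo A (PySem.List.enumerate A) PySem.Set.empty := by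
  intro y hy
  unfold pvLB at hy
  rcases List.mem_map.mp hy with ⟨v, hvf, rfl⟩
  rcases List.mem_filter.mp hvf with ⟨hvd, h2b⟩
  have h2 : 2 ≤ (pvOcc A v).length := by simpa using h2b
  have hvA : v ∈ A := (PySem.List.mem_dedup A v).mp hvd
  obtain ⟨hhead, hmemf, hlb⟩ := pv_occ_head A v hvA
  obtain ⟨hmem1, hlt01, _⟩ := pv_occ_two A v h2
  rcases (pv_mem_occ A v _).mp hmem1 with ⟨k, hkA, hkeq, hkv⟩
  rcases (pv_mem_occ A v _).mp hmemf with ⟨f, hfA, hfeq, hfv⟩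
  have hfk : f < k := by
    rw [← hhead] at hfeq
    omega
  have hkE : k < (PySem.List.enumerate A).length := by simpa using hkA
  have hfE : f < (PySem.List.enumerate A).length := by simpa using hfA
  have hmem := pv_gombo_intro A (PySem.List.enumerate A) PySem.Set.empty k hkE
    (Or.inr ⟨f, hfE, hfk, by
      rw [PySem.List.getElem_enumerate A 0 f hfE, PySem.List.getElem_enumerate A 0 k hkE]
      simp [hfv, hkv]⟩)
  rw [PySem.List.getElem_enumerate A 0 k hkE] at hmem
  simp only [zero_add] at hmem
  have : (k : Int) - pvFirst A A[k]
      = PySem.List.pyGetD (pvOcc A v) 1 0 - PySem.List.pyGetD (pvOcc A v) 0 0 := by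
    rw [hkv, hhead, hkeq]
  rwa [this] at hmem

-- ===== VERDICT (by name: the statement is the Claim_ definition above) =====
theorem solve_spec : Claim_equal_solve := by
  intro A _
  unfold Spec_solve
  rw [pv_solve_eq, pv_solve_alt_eq,
    pv_fold_min_eq_of_dom 100000 _ _ (pv_dom1 A) (pv_dom2 A)]
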